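-- pv_equiv track=rewrite | github.com/Lateily/Alpha-Research | scripts/backtest.py | get_vp_score_on_date
-- ===== SOURCE A (Python) =====
-- def get_vp_score_on_date(
--     ticker_history: dict[str, dict[str, int]],
--     ticker: str,
--     date_str: str,
-- ) -> int | None:
--     """
--     Return most recent VP score as-of date_str (point-in-time safe).
--     Seed date 2025-01-01 ensures backtest never returns None for watchlist tickers.
--     """
--     dates = ticker_history.get(ticker, {})
--     if not dates:
--         return None   # ticker entirely unknown
--     past = {d: s for d, s in dates.items() if d <= date_str}
--     if past:
--         return past[max(past)]
--     # Query predates all known history → use earliest as proxy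
--     return dates[min(dates.keys())]
-- ===== SOURCE B (Python) =====
-- def get_vp_score_on_date(
--     ticker_history: dict[str, dict[str, int]],
--     ticker: str,
--     date_str: str,
-- ) -> int | None:
--     """Sort the ticker's dates newest-first, then return the score of the first
--     date <= date_str; if none qualifies, the last (earliest) date is the proxy."""
--     dates = ticker_history.get(ticker)
--     if not dates:
--         return None
--     items = sorted(dates.items(), key=lambda p: p[0], reverse=True)
--     for d, s in items:
--         if d <= date_str:
--             return s
--     return items[-1][1]
-- ===== Notes on version B (the rewrite author's own statement) =====
-- stated objective: alternative
-- what changed: B sorts the ticker's dates in descending order and scans for the first date <= date_str (sort-then-scan), with the sorted list's last element as the earliest-date fallback, instead of A's filtered-dict construction followed by max()/min() reductions.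
import Mathlib
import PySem

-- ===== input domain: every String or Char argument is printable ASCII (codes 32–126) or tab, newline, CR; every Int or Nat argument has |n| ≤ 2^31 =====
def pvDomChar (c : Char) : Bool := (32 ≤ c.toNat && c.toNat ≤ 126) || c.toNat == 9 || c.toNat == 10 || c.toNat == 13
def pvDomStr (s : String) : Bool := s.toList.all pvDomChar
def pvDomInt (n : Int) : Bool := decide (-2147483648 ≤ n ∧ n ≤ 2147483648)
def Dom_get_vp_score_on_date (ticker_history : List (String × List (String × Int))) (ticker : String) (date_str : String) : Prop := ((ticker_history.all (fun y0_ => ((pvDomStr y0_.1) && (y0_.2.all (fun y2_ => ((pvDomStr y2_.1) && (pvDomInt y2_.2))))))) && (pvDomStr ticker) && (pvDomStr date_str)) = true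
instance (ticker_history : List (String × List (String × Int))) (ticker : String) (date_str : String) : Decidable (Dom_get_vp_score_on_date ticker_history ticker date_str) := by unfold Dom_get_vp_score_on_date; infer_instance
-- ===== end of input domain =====

-- B replaces A's filtered-dict plus max()/min() reductions by sort-then-scan: sort the
-- ticker's dates newest-first, return the first score with date ≤ date_str, falling back
-- to the sorted list's last (earliest) entry (objective: alternative algorithm, not faster).

-- ===== PORT A =====
-- The dict arguments arrive as association lists; both ports first apply Python's
-- dict construction (PySem.Dict.ofList: last value wins, first-insertion position).
def get_vp_score_on_date (ticker_history : List (String × List (String × Int))) (ticker : String) (date_str : String) : Option Int :=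
  let h : PySem.Dict String (PySem.Dict String Int) :=
    PySem.Dict.ofList (ticker_history.map (fun p => (p.1, PySem.Dict.ofList p.2)))
  let dates := h.getD ticker PySem.Dict.empty
  if dates.items.isEmpty then
    none
  else
    -- past = {d: s for d, s in dates.items() if d <= date_str}
    let past : PySem.Dict String Int :=
      dates.items.foldl (fun d p => if p.1 ≤ date_str then d.insert p.1 p.2 else d) PySem.Dict.empty
    if past.items.isEmpty then
      -- return dates[min(dates.keys())]
      match PySem.List.min? (PySem.Dict.keys dates) (fun x => x) with
      | some m => dates.get? m
      | none => none
    else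
      -- return past[max(past)]
      match PySem.List.max? (PySem.Dict.keys past) (fun x => x) with
      | some m => past.get? m
      | none => none

-- ===== PORT B =====
-- the for-loop of B: first pair whose date is ≤ date_str, scanning the sorted list
def pvFindLE (date_str : String) : List (String × Int) → Option Int
  | [] => none
  | p :: t => if p.1 ≤ date_str then some p.2 else pvFindLE date_str t

def get_vp_score_on_date_alt (ticker_history : List (String × List (String × Int))) (ticker : String) (date_str : String) : Option Int :=
  let h : PySem.Dict String (PySem.Dict String Int) :=
    PySem.Dict.ofList (ticker_history.map (fun p => (p.1, PySem.Dict.ofList p.2)))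
  match h.get? ticker with
  | none => none
  | some dates =>
    if dates.items.isEmpty then none
    else
      -- items = sorted(dates.items(), key=lambda p: p[0], reverse=True)
      let items := PySem.List.sorted dates.items (fun p => p.1) true
      match pvFindLE date_str items with
      | some s => some s
      | none =>
        -- return items[-1][1]
        (PySem.List.pyGet? items (-1)).map (fun p => p.2)

-- ===== PRECONDITION & SPEC =====
def Spec_get_vp_score_on_date (ticker_history : List (String × List (String × Int))) (ticker : String) (date_str : String) (out : Option Int) : Prop := out = get_vp_score_on_date_alt ticker_history ticker date_str
instance (ticker_history : List (String × List (String × Int))) (ticker : String) (date_str : String) (out : Option Int) : Decidable (Spec_get_vp_score_on_date ticker_history ticker date_str out) := by unfold Spec_get_vp_score_on_date; infer_instance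

-- ===== CLAIM (what is proved, stated in full; the proofs are below) =====
def Claim_equal_get_vp_score_on_date : Prop := ∀ (ticker_history : List (String × List (String × Int))) (ticker : String) (date_str : String), Dom_get_vp_score_on_date ticker_history ticker date_str → Spec_get_vp_score_on_date ticker_history ticker date_str (get_vp_score_on_date ticker_history ticker date_str)

-- ===== LEMMAS AND PROOFS =====

-- every value of a dict built by an insert loop comes from the start dict or the pair list
theorem pv_values_foldl_insert {κ ν : Type} [BEq κ] [LawfulBEq κ]
    (L : List (κ × ν)) (d : PySem.Dict κ ν) {v : ν}
    (h : v ∈ (L.foldl (fun acc p => acc.insert p.1 p.2) d).values) :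
    v ∈ d.values ∨ v ∈ L.map (·.2) := by
  induction L generalizing d with
  | nil => exact Or.inl h
  | cons p t ih =>
    rcases ih (d.insert p.1 p.2) h with h' | h'
    · rcases PySem.Dict.mem_values_insert d p.1 p.2 v h' with h'' | h''
      · exact Or.inr (by simp [h''])
      · exact Or.inl h''
    · exact Or.inr (by simp [List.map_cons]; right; simpa using h')

-- the scan returns none exactly when no date qualifies
theorem pvFindLE_eq_none (ds : String) (l : List (String × Int)) :
    pvFindLE ds l = none ↔ ∀ q ∈ l, ¬ q.1 ≤ ds := by
  induction l with
  | nil => simp [pvFindLE]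
  | cons p t ih =>
    by_cases hp : p.1 ≤ ds
    · constructor
      · intro h; simp [pvFindLE, hp] at h
      · intro h; exact absurd hp (h p List.mem_cons_self)
    · constructor
      · intro h q hq
        rcases List.mem_cons.mp hq with h' | h'
        · exact h' ▸ hp
        · exact (ih.mp (by simpa [pvFindLE, hp] using h)) q h'
      · intro h
        simp only [pvFindLE, if_neg hp]
        exact ih.mpr (fun q hq => h q (List.mem_cons_of_mem _ hq))

-- on a list sorted newest-first, the scan's hit is the latest qualifying date
theorem pvFindLE_eq_some (ds : String) (l : List (String × Int))
    (hpair : l.Pairwise (fun a b => b.1 ≤ a.1)) {v : Int}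
    (h : pvFindLE ds l = some v) :
    ∃ b ∈ l, b.1 ≤ ds ∧ v = b.2 ∧ ∀ q ∈ l, q.1 ≤ ds → q.1 ≤ b.1 := by
  induction l with
  | nil => simp [pvFindLE] at h
  | cons p t ih =>
    rcases List.pairwise_cons.mp hpair with ⟨hhead, htail⟩
    by_cases hp : p.1 ≤ ds
    · refine ⟨p, List.mem_cons_self, hp, ?_, ?_⟩
      · simpa [pvFindLE, hp] using h.symm
      · intro q hq _
        rcases List.mem_cons.mp hq with h' | h'
        · exact h' ▸ le_refl _
        · exact hhead q h'
    · simp only [pvFindLE, if_neg hp] at h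
      obtain ⟨b, hb, hble, hv, hall⟩ := ih htail h
      refine ⟨b, List.mem_cons_of_mem _ hb, hble, hv, ?_⟩
      intro q hq hqle
      rcases List.mem_cons.mp hq with h' | h'
      · exact absurd (h' ▸ hqle) hp
      · exact hall q h' hqle

-- the last element of a ≥-pairwise list is a lower bound
theorem pv_getLast_le (l : List (String × Int)) (hne : l ≠ [])
    (hpair : l.Pairwise (fun a b => b.1 ≤ a.1)) :
    ∀ q ∈ l, (l.getLast hne).1 ≤ q.1 := by
  intro q hq
  obtain ⟨i, hi, hqi⟩ := List.mem_iff_getElem.mp hq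
  subst hqi
  rw [List.getLast_eq_getElem hne]
  rcases Nat.lt_or_ge i (l.length - 1) with h | h
  · exact List.pairwise_iff_getElem.mp hpair i (l.length - 1) hi (by omega) h
  · have hieq : i = l.length - 1 := by omega
    subst hieq
    exact le_refl _

-- ===== VERDICT (by name: the statement is the Claim_ definition above) =====
theorem get_vp_score_on_date_spec : Claim_equal_get_vp_score_on_date := by
  intro th ticker date_str _
  unfold Spec_get_vp_score_on_date
  dsimp only [get_vp_score_on_date, get_vp_score_on_date_alt]
  rw [PySem.Dict.getD_eq_get?_getD]
  cases hg : (PySem.Dict.ofList (th.map (fun p => (p.1, PySem.Dict.ofList p.2)))).get? ticker with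
  | none => simp [PySem.Dict.empty]
  | some dates =>
    -- dates is one of the inner dicts built by ofList, so its keys are unique
    have hnd : dates.keys.Nodup := by
      have hit := PySem.Dict.mem_items_of_get?_eq_some _ hg
      have hv : dates ∈ (th.map (fun p => (p.1, PySem.Dict.ofList p.2))).map (·.2) := by
        have := pv_values_foldl_insert (th.map (fun p => (p.1, PySem.Dict.ofList p.2)))
          PySem.Dict.empty (v := dates)
          (by exact List.mem_map.mpr ⟨(ticker, dates), hit, rfl⟩)
        simpa [PySem.Dict.empty, PySem.Dict.values] using this
      have hv' : dates ∈ th.map (fun p => PySem.Dict.ofList p.2) := by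
        simpa [List.map_map, Function.comp] using hv
      obtain ⟨p, _, hp⟩ := List.mem_map.mp hv'
      exact hp ▸ PySem.Dict.nodup_keys_ofList p.2
    simp only [Option.getD_some]
    by_cases hE : dates.items = []
    · simp [hE]
    · simp only [List.isEmpty_iff, hE, if_false]
      rw [PySem.List.foldl_ite_eq_foldl_filter
        (p := fun q : String × Int => q.1 ≤ date_str)
        (f := fun (d : PySem.Dict String Int) (q : String × Int) => d.insert q.1 q.2)]
      set fl := dates.items.filter (fun q => decide (q.1 ≤ date_str)) with hfl
      have hndfl : (fl.map (fun a => a.1)).Nodup := by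
        have hsub : List.Sublist (fl.map (fun a => a.1)) (dates.items.map (fun a => a.1)) :=
          List.filter_sublist.map _
        exact List.Nodup.sublist hsub (by simpa [PySem.Dict.keys] using hnd)
      have hpast : (fl.foldl (fun d (p : String × Int) => d.insert p.1 p.2) PySem.Dict.empty).items = fl := by
        have := PySem.Dict.items_foldl_insert_fresh fl (fun a => a.1) (fun a => a.2)
          PySem.Dict.empty (by intro a _; simp [PySem.Dict.empty, PySem.Dict.contains]) hndfl
        simpa [PySem.Dict.empty] using this
      set s := PySem.List.sorted dates.items (fun p : String × Int => p.1) true with hs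
      have hmem : ∀ q : String × Int, q ∈ s ↔ q ∈ dates.items := by
        intro q; rw [hs]; exact PySem.List.mem_sorted dates.items (fun p : String × Int => p.1) true q
      have hpair : s.Pairwise (fun a b : String × Int => b.1 ≤ a.1) := by
        rw [hs]; exact PySem.List.sorted_pairwise_rev _ _
      cases hfind : pvFindLE date_str s with
      | some v =>
        -- a qualifying date exists; the scan's hit carries the max key of the filter
        obtain ⟨b, hb, hble, hv, hall⟩ := pvFindLE_eq_some date_str s hpair hfind
        have hbfl : b ∈ fl := by
          rw [hfl]
          exact List.mem_filter.mpr ⟨(hmem b).mp hb, by simpa using hble⟩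
        have hflne : fl ≠ [] := fun h => by simp [h] at hbfl
        have hpastne : ¬ (fl.foldl (fun d (p : String × Int) => d.insert p.1 p.2) PySem.Dict.empty).items = [] := by
          simp [hpast, hflne]
        obtain ⟨m, hm⟩ : ∃ m, PySem.List.max? (PySem.Dict.keys
            (fl.foldl (fun d (p : String × Int) => d.insert p.1 p.2) PySem.Dict.empty)) (fun x => x) = some m := by
          cases h' : PySem.List.max? (PySem.Dict.keys
              (fl.foldl (fun d (p : String × Int) => d.insert p.1 p.2) PySem.Dict.empty)) (fun x => x) with
          | none =>
            exact absurd ((PySem.List.max?_eq_none_iff _ _).mp h')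
              (by simp [PySem.Dict.keys, hpast, hflne])
          | some m => exact ⟨m, rfl⟩
        have hmmem := PySem.List.max?_mem hm
        rw [PySem.Dict.keys, hpast] at hmmem
        obtain ⟨q, hq, hqm⟩ := List.mem_map.mp hmmem
        have hqle : q.1 ≤ date_str := by
          have := (List.mem_filter.mp (hfl ▸ hq)).2; simpa using this
        have h1 : m ≤ b.1 := hqm ▸ hall q ((hmem q).mpr (List.mem_of_mem_filter (hfl ▸ hq))) hqle
        have h2 : b.1 ≤ m := PySem.List.max?_isMax hm b.1
          (by rw [PySem.Dict.keys, hpast]; exact List.mem_map_of_mem hbfl)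
        have hmeq : m = b.1 := le_antisymm h1 h2
        have hget : (fl.foldl (fun d (p : String × Int) => d.insert p.1 p.2) PySem.Dict.empty).get? m = some b.2 := by
          rw [hmeq]
          refine PySem.Dict.get?_of_mem_items _ ?_ ?_
          · rw [hpast]; exact hbfl
          · simp [PySem.Dict.keys, hpast, hndfl]
        rw [if_neg hpastne]
        simp only [hm, hget, hv]
      | none =>
        -- nothing qualifies: the filter is empty and both sides fall back to the earliest date
        have hnone : ∀ q ∈ s, ¬ q.1 ≤ date_str := (pvFindLE_eq_none date_str s).mp hfind
        have hflE : fl = [] := by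
          rw [hfl]
          refine List.filter_eq_nil_iff.mpr ?_
          intro q hq
          simpa using hnone q ((hmem q).mpr hq)
        have hsne : s ≠ [] := by
          rw [hs]
          simpa [PySem.List.sorted_eq_nil_iff] using hE
        set mlast := s.getLast hsne with hmlast
        have hlow : ∀ q ∈ s, mlast.1 ≤ q.1 := pv_getLast_le s hsne hpair
        have hmin : ∀ q ∈ dates.items, mlast.1 ≤ q.1 := fun q hq => hlow q ((hmem q).mpr hq)
        obtain ⟨k, hk⟩ : ∃ k, PySem.List.min? (PySem.Dict.keys dates) (fun x => x) = some k := by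
          cases h' : PySem.List.min? (PySem.Dict.keys dates) (fun x => x) with
          | none => exact absurd ((PySem.List.min?_eq_none_iff _ _).mp h') (by simp [PySem.Dict.keys, hE])
          | some k => exact ⟨k, rfl⟩
        have hkmem := PySem.List.min?_mem hk
        obtain ⟨q, hq, hqk⟩ := List.mem_map.mp hkmem
        have h1 : k ≤ mlast.1 := PySem.List.min?_isMin hk mlast.1
          (List.mem_map_of_mem ((hmem mlast).mp (List.getLast_mem hsne)))
        have h2 : mlast.1 ≤ k := hqk ▸ hmin q hq
        have hkeq : k = mlast.1 := le_antisymm h1 h2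
        have hget : dates.get? k = some mlast.2 := by
          rw [hkeq]
          exact PySem.Dict.get?_of_mem_items dates ((hmem mlast).mp (List.getLast_mem hsne)) hnd
        have hlastget : PySem.List.pyGet? s (-1) = some mlast := by
          rw [PySem.List.pyGet?_neg_one, hmlast, List.getLast?_eq_some_getLast hsne]
        simp only [hflE, List.foldl_nil, hk, hget, hlastget, Option.map_some]
        simp [PySem.Dict.empty]
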